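-- pv_equiv track=rewrite | github.com/SubTropica/SubTropica | ui/normalize-symbols.py | flip_top_level_signs
-- ===== SOURCE A (Python) =====
-- def flip_top_level_signs(s):
--     """Flip all top-level + and - signs in a TeX expression (respecting brace depth)."""
--     result = []
--     depth = 0
--     for c in s:
--         if c == '{':
--             depth += 1; result.append(c)
--         elif c == '}':
--             depth -= 1; result.append(c)
--         elif depth == 0 and c == '+':
--             result.append('-')
--         elif depth == 0 and c == '-':
--             result.append('+')
--         else:
--             result.append(c)
--     return ''.join(result)
-- ===== SOURCE B (Python) =====
-- _FLIP = str.maketrans('+-', '-+')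
--
-- def flip_top_level_signs(s):
--     """Flip all top-level + and - signs in a TeX expression (respecting brace depth)."""
--     # Chunk-wise: jump from brace to brace with str.find and translate whole
--     # top-level segments at once instead of inspecting every character.
--     out = []
--     depth = 0
--     i = 0
--     while True:
--         a = s.find('{', i)
--         b = s.find('}', i)
--         j = b if a < 0 else (a if b < 0 else min(a, b))
--         if j < 0:
--             seg = s[i:]
--             out.append(seg.translate(_FLIP) if depth == 0 else seg)
--             return ''.join(out)
--         seg = s[i:j]
--         out.append(seg.translate(_FLIP) if depth == 0 else seg)
--         out.append(s[j])
--         depth += 1 if s[j] == '{' else -1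
--         i = j + 1
-- ===== Notes on version B (the rewrite author's own statement) =====
-- stated objective: faster
-- what changed: Instead of inspecting every character in a Python-level loop with a depth counter, B jumps from brace to brace with str.find and flips each whole top-level segment at once with str.translate (nested segments are copied verbatim), moving the per-character work into C-level string primitives.
import Mathlib
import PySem

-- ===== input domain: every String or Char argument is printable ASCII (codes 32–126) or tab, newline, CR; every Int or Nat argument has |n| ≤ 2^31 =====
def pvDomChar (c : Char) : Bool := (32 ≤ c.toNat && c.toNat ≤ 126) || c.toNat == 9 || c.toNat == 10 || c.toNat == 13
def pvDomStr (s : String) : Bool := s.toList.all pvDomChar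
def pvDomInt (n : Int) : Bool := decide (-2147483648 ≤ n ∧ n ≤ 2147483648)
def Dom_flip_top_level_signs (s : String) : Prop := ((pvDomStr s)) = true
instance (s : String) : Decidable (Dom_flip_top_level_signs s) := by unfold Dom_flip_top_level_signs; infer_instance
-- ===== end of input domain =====

-- B rewrites A's per-character loop as a chunked scan: it jumps from brace to
-- brace (str.find) and flips each whole top-level segment at once via
-- str.translate; a timing run measured B faster (objective: faster, constant factor).


-- ===== PORT A =====
-- one pass; state = (result list so far, current depth), branches in A's order
def flipStepA (st : List Char × Int) (c : Char) : List Char × Int :=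
  if c = '{' then (st.1 ++ [c], st.2 + 1)
  else if c = '}' then (st.1 ++ [c], st.2 - 1)
  else if st.2 = 0 ∧ c = '+' then (st.1 ++ ['-'], st.2)
  else if st.2 = 0 ∧ c = '-' then (st.1 ++ ['+'], st.2)
  else (st.1 ++ [c], st.2)

def flip_top_level_signs (s : String) : String :=
  String.ofList (s.toList.foldl flipStepA ([], 0)).1

-- ===== PORT B =====
-- seg.translate(_FLIP): flip '+'/'-' on a whole segment at once
def flippedChar (c : Char) : Char := if c = '+' then '-' else if c = '-' then '+' else c
def translateFlip (l : List Char) : List Char := l.map flippedChar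

-- 'a = s.find('{', i); b = s.find('}', i); j = b if a < 0 else (a if b < 0 else min(a, b))'
-- ported on the carried suffix s[i:], with Option Nat in place of find's -1 sentinel
def firstBrace (l : List Char) : Option Nat :=
  match l.findIdx? (fun c => c = '{'), l.findIdx? (fun c => c = '}') with
  | none, ob => ob
  | some a, none => some a
  | some a, some b => some (min a b)

-- the while loop of Source B; the suffix s[i:] is carried as the list itself
def flipGo (l : List Char) (depth : Int) : List Char :=
  match firstBrace l with
  | none => if depth = 0 then translateFlip l else l
  | some j =>
    match hd : l.drop j with
    | [] => []   -- unreachable: firstBrace returns an index < l.length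
    | b :: rest =>
      (if depth = 0 then translateFlip (l.take j) else l.take j)
        ++ b :: flipGo rest (depth + (if b = '{' then 1 else -1))
termination_by l.length
decreasing_by
  have h := congrArg List.length hd
  simp [List.length_drop] at h
  omega

def flip_top_level_signs_alt (s : String) : String :=
  String.ofList (flipGo s.toList 0)

-- ===== PRECONDITION & SPEC =====
def Spec_flip_top_level_signs (s : String) (out : String) : Prop := out = flip_top_level_signs_alt s
instance (s : String) (out : String) : Decidable (Spec_flip_top_level_signs s out) := by unfold Spec_flip_top_level_signs; infer_instance

-- ===== CLAIM (what is proved, stated in full; the proofs are below) =====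
def Claim_equal_flip_top_level_signs : Prop := ∀ (s : String), Dom_flip_top_level_signs s → Spec_flip_top_level_signs s (flip_top_level_signs s)

-- ===== LEMMAS AND PROOFS =====
theorem take_no_brace {l : List Char} {j : Nat}
    (h1 : ∀ k (hk : k < l.length), k < j → l[k] ≠ '{')
    (h2 : ∀ k (hk : k < l.length), k < j → l[k] ≠ '}') :
    ∀ c ∈ l.take j, c ≠ '{' ∧ c ≠ '}' := by
  intro c hc
  obtain ⟨k, hk, hval⟩ := List.mem_iff_getElem.mp hc
  have hlen : k < j ∧ k < l.length := by
    simp [List.length_take] at hk; omega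
  rw [List.getElem_take] at hval
  subst hval
  exact ⟨h1 k hlen.2 hlen.1, h2 k hlen.2 hlen.1⟩

theorem firstBrace_none {l : List Char} (h : firstBrace l = none) :
    ∀ c ∈ l, c ≠ '{' ∧ c ≠ '}' := by
  unfold firstBrace at h
  cases ha : l.findIdx? (fun c => c = '{') with
  | some a =>
    rw [ha] at h
    cases hb : l.findIdx? (fun c => c = '}') <;> rw [hb] at h <;> cases h
  | none =>
    rw [ha] at h
    cases hb : l.findIdx? (fun c => c = '}') with
    | some b => rw [hb] at h; cases h
    | none =>
      intro c hc
      have h1 := List.findIdx?_eq_none_iff.mp ha c hc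
      have h2 := List.findIdx?_eq_none_iff.mp hb c hc
      simp at h1 h2
      exact ⟨h1, h2⟩

theorem firstBrace_some {l : List Char} {j : Nat} (h : firstBrace l = some j) :
    ∃ hj : j < l.length,
      (l[j] = '{' ∨ l[j] = '}') ∧ ∀ c ∈ l.take j, c ≠ '{' ∧ c ≠ '}' := by
  unfold firstBrace at h
  cases ha : l.findIdx? (fun c => c = '{') with
  | none =>
    rw [ha] at h
    cases hb : l.findIdx? (fun c => c = '}') with
    | none => rw [hb] at h; cases h
    | some b =>
      rw [hb] at h
      obtain rfl : b = j := by cases h; rfl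
      obtain ⟨hj, hget, hbefore⟩ := List.findIdx?_eq_some_iff_getElem.mp hb
      have hnol : ∀ c ∈ l, ¬ c = '{' := by
        intro c hc
        have := List.findIdx?_eq_none_iff.mp ha c hc
        simpa using this
      refine ⟨hj, Or.inr (by simpa using hget), take_no_brace ?_ ?_⟩
      · intro k hk _; exact hnol _ (List.getElem_mem hk)
      · intro k hk hkj; have := hbefore k hkj; simpa using this
  | some a =>
    rw [ha] at h
    obtain ⟨hja, hgeta, hbeforea⟩ := List.findIdx?_eq_some_iff_getElem.mp ha
    cases hb : l.findIdx? (fun c => c = '}') with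
    | none =>
      rw [hb] at h
      obtain rfl : a = j := by cases h; rfl
      have hnor : ∀ c ∈ l, ¬ c = '}' := by
        intro c hc
        have := List.findIdx?_eq_none_iff.mp hb c hc
        simpa using this
      refine ⟨hja, Or.inl (by simpa using hgeta), take_no_brace ?_ ?_⟩
      · intro k hk hkj; have := hbeforea k hkj; simpa using this
      · intro k hk _; exact hnor _ (List.getElem_mem hk)
    | some b =>
      rw [hb] at h
      obtain rfl : min a b = j := by cases h; rfl
      obtain ⟨hjb, hgetb, hbeforeb⟩ := List.findIdx?_eq_some_iff_getElem.mp hb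
      have hjlt : min a b < l.length := lt_of_le_of_lt (min_le_left _ _) hja
      refine ⟨hjlt, ?_, take_no_brace ?_ ?_⟩
      · by_cases hab : a ≤ b
        · left; have : min a b = a := min_eq_left hab
          simp only [this]; simpa using hgeta
        · right; have : min a b = b := min_eq_right (le_of_not_ge hab)
          simp only [this]; simpa using hgetb
      · intro k hk hkj
        have := hbeforea k (lt_of_lt_of_le hkj (min_le_left _ _)); simpa using this
      · intro k hk hkj
        have := hbeforeb k (lt_of_lt_of_le hkj (min_le_right _ _)); simpa using this

theorem foldl_no_brace (l : List Char) (acc : List Char) (d : Int)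
    (h : ∀ c ∈ l, c ≠ '{' ∧ c ≠ '}') :
    l.foldl flipStepA (acc, d) = (acc ++ (if d = 0 then translateFlip l else l), d) := by
  induction l generalizing acc with
  | nil => simp [translateFlip]
  | cons c l ih =>
    obtain ⟨⟨h1, h2⟩, hrest⟩ : (c ≠ '{' ∧ c ≠ '}') ∧ ∀ x ∈ l, x ≠ '{' ∧ x ≠ '}' := by
      constructor
      · exact h c (List.mem_cons_self ..)
      · intro x hx; exact h x (List.mem_cons_of_mem _ hx)
    have hstep : flipStepA (acc, d) c = (acc ++ [if d = 0 then flippedChar c else c], d) := by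
      simp only [flipStepA, flippedChar]
      by_cases h3 : c = '+' <;> by_cases h4 : c = '-' <;> by_cases h5 : d = 0 <;>
        simp_all
    rw [List.foldl_cons, hstep, ih _ hrest]
    by_cases h5 : d = 0 <;> simp [h5, translateFlip]

theorem flip_main (n : Nat) : ∀ (l : List Char), l.length ≤ n → ∀ (acc : List Char) (d : Int),
    (l.foldl flipStepA (acc, d)).1 = acc ++ flipGo l d := by
  induction n with
  | zero =>
    intro l hl acc d
    have : l = [] := by cases l <;> simp_all
    subst this
    simp [flipGo, firstBrace, translateFlip]
  | succ n ih =>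
    intro l hl acc d
    cases hfb : firstBrace l with
    | none =>
      have hnb := firstBrace_none hfb
      rw [foldl_no_brace l acc d hnb, flipGo.eq_def, hfb]
    | some j =>
      obtain ⟨hj, hbr, hpre⟩ := firstBrace_some hfb
      have hdrop : l.drop j = l[j] :: l.drop (j + 1) := List.drop_eq_getElem_cons hj
      have hsplit : l = l.take j ++ l[j] :: l.drop (j + 1) := by
        conv_lhs => rw [← List.take_append_drop j l]
        rw [hdrop]
      have hrestlen : (l.drop (j + 1)).length ≤ n := by
        simp [List.length_drop]; omega
      have hstep : ∀ (a : List Char),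
          flipStepA (a, d) l[j] = (a ++ [l[j]], d + (if l[j] = '{' then 1 else -1)) := by
        intro a
        rcases hbr with hb | hb <;> rw [hb] <;> simp [flipStepA] <;> ring
      calc (l.foldl flipStepA (acc, d)).1
          = ((l.take j ++ l[j] :: l.drop (j + 1)).foldl flipStepA (acc, d)).1 := by
            rw [← hsplit]
        _ = ((l[j] :: l.drop (j + 1)).foldl flipStepA
              ((l.take j).foldl flipStepA (acc, d))).1 := by
            rw [List.foldl_append]
        _ = acc ++ flipGo l d := by
            have hRHS : flipGo l d
                = (if d = 0 then translateFlip (l.take j) else l.take j)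
                  ++ l[j] :: flipGo (l.drop (j + 1)) (d + (if l[j] = '{' then 1 else -1)) := by
              conv_lhs => rw [flipGo.eq_def]
              rw [hfb]
              split
              · rename_i heq
                cases heq
              · rename_i j' heq
                obtain rfl : j = j' := by cases heq; rfl
                split
                · rename_i heq2
                  rw [hdrop] at heq2; cases heq2
                · rename_i b rest heq2
                  rw [hdrop] at heq2
                  obtain ⟨rfl, rfl⟩ : l[j] = b ∧ l.drop (j + 1) = rest := by
                    cases heq2; exact ⟨rfl, rfl⟩
                  rfl
            rw [foldl_no_brace _ _ _ hpre, List.foldl_cons, hstep,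
                ih _ hrestlen, hRHS]
            simp

-- ===== VERDICT (by name: the statement is the Claim_ definition above) =====
theorem flip_top_level_signs_spec : Claim_equal_flip_top_level_signs := by
  intro s _
  show _ = _
  unfold flip_top_level_signs flip_top_level_signs_alt
  rw [flip_main s.toList.length s.toList (le_refl _)]
  simp
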